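-- pv_equiv track=rewrite | github.com/RahulJha393/MySolutions | CodeJam2021/ReverseSortEngeneering.py | givel
-- ===== SOURCE A (Python) =====
-- def pal(l,i,n):
--          return l[:i]+l[i:i+n][::-1]+l[i+n:]
--
-- def givel(l,n):
--     def ret(l,n):
--         l=[x for x in range(1,l+1)][::-1]
--         i=len(l)-1
--         while(sum(l)!=n):
--             if((l[i]==1 and i<len(l)-1) or (l[i]==0 and i==len(l)-1)):
--                 i-=1
--             else:
--                 l[i]-=1
--         return l
--     Q=ret(l,n)
--     L=[x for x in range(1,l+1)]
--     for x in range(l):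
--         L=pal(L,l-1-x,Q[l-1-x])
--     return L
-- ===== SOURCE B (Python) =====
-- def givel(l, n):
--     # Cost list directly: every position i < l-1 carries a base cost of 1 and can
--     # take up to l-1-i extra; hand the excess n-(l-1) out greedily front to back,
--     # the last position holding whatever remains.
--     costs = []
--     r = n - (l - 1)
--     for i in range(l - 1):
--         t = max(0, min(r, l - 1 - i))
--         costs.append(1 + t)
--         r -= t
--     if l > 0:
--         costs.append(r)
--     # Apply the reversal of length costs[i] at each position, last to first.
--     out = list(range(1, l + 1))
--     i = l - 1
--     while i >= 0:
--         c = costs[i]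
--         out = out[:i] + out[i:i + c][::-1] + out[i + c:]
--         i -= 1
--     return out
-- ===== Notes on version B (the rewrite author's own statement) =====
-- stated objective: faster
-- what changed: A finds the cost list by decrementing entries one at a time while re-summing the whole list on every iteration; B computes the cost list arithmetically in a single pass (greedy clamp of the excess n-(l-1), the last position holding the remainder) and applies the reversals in a descending while loop. Pre_ excludes only inputs on which A never returns (targets above the maximal sum, or l<=0 with n!=0, where A loops forever or raises IndexError).
import Mathlib
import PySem

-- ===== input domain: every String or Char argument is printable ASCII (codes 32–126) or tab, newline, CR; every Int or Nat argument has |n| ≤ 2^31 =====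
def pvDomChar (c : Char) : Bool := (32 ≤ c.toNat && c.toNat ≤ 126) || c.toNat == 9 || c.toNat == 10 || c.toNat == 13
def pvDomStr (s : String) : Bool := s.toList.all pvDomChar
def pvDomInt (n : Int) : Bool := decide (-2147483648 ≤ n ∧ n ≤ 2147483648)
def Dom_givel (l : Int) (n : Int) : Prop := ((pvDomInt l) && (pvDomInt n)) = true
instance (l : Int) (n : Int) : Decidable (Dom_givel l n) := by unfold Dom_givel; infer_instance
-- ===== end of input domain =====

-- B replaces A's decrement-and-resum search for the cost list by one greedy
-- arithmetic pass (measurably faster; see claim); the reversals are then applied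
-- by a descending while loop.

-- ===== PORT A =====
-- pal(l,i,n) = l[:i] + l[i:i+n][::-1] + l[i+n:]
def pvPal (L : List Int) (i : Int) (n : Int) : List Int :=
  PySem.List.slice L none (some i)
    ++ (PySem.List.slice L (some i) (some (i + n))).reverse
    ++ PySem.List.slice L (some (i + n)) none

-- the 'while sum(l)!=n' loop of ret; fuel is only a totality guard (under
-- Pre_givel the loop halts well within the supplied fuel)
def pvRetLoop (n : Int) : Nat → List Int → Int → List Int
  | 0, lst, _ => lst
  | fuel+1, lst, i =>
    if lst.sum = n then lst
    else
      match PySem.List.pyGet? lst i with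
      | none => lst   -- Python IndexError; unreachable under Pre_givel
      | some v =>
        if (v = 1 ∧ i < (lst.length : Int) - 1) ∨ (v = 0 ∧ i = (lst.length : Int) - 1)
        then pvRetLoop n fuel lst (i - 1)
        else pvRetLoop n fuel (PySem.List.pySetD lst i (v - 1)) i

def pvRet (l : Int) (n : Int) : List Int :=
  let lst := (PySem.List.pyRange 1 (l + 1) 1).reverse
  pvRetLoop n ((l * (l + 1)).toNat + (-n).toNat + l.toNat + 2) lst ((lst.length : Int) - 1)

def givel (l : Int) (n : Int) : List Int :=
  let Q := pvRet l n
  (PySem.List.pyRange 0 l 1).foldl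
    -- Q[l-1-x]: the index is always in range (Q has length l), so pyGetD's default is never read
    (fun L x => pvPal L (l - 1 - x) (PySem.List.pyGetD Q (l - 1 - x) 0))
    (PySem.List.pyRange 1 (l + 1) 1)

-- ===== PORT B =====
-- the 'while i >= 0' loop: out = out[:i] + out[i:i+c][::-1] + out[i+c:], i -= 1
def pvApplyRev (costs : List Int) (out : List Int) (i : Int) : List Int :=
  if h : 0 ≤ i then
    let c := PySem.List.pyGetD costs i 0
    pvApplyRev costs
      (PySem.List.slice out none (some i)
        ++ (PySem.List.slice out (some i) (some (i + c))).reverse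
        ++ PySem.List.slice out (some (i + c)) none)
      (i - 1)
  else out
termination_by (i + 1).toNat
decreasing_by omega

def givel_alt (l : Int) (n : Int) : List Int :=
  let p := (PySem.List.pyRange 0 (l - 1) 1).foldl
    (fun (q : List Int × Int) (i : Int) =>
      let t := max 0 (min q.2 (l - 1 - i))
      (q.1 ++ [1 + t], q.2 - t))
    ([], n - (l - 1))
  let costs := if 0 < l then p.1 ++ [p.2] else p.1
  pvApplyRev costs (PySem.List.pyRange 1 (l + 1) 1) (l - 1)

-- ===== PRECONDITION & SPEC =====
-- Pre_ excludes exactly the inputs on which A never returns: if 2n > l(l+1) the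
-- while loop's sum starts at l(l+1)/2 and only ever decreases, so it never equals n
-- (A diverges); for l ≤ 0 with n ≠ 0 it diverges the same way or hits IndexError
-- on the empty list.
def Pre_givel (l : Int) (n : Int) : Prop :=
  2 * n ≤ l * (l + 1) ∧ (l ≤ 0 → n = 0)
instance (l : Int) (n : Int) : Decidable (Pre_givel l n) := by unfold Pre_givel; infer_instance
def pvWitness_givel : Int × Int := (4, 6)

def Spec_givel (l : Int) (n : Int) (out : List Int) : Prop := out = givel_alt l n
instance (l : Int) (n : Int) (out : List Int) : Decidable (Spec_givel l n out) := by unfold Spec_givel; infer_instance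

-- ===== CLAIM (what is proved, stated in full; the proofs are below) =====
def Claim_equal_givel : Prop := ∀ (l : Int) (n : Int), Dom_givel l n → Pre_givel l n → Spec_givel l n (givel l n)

-- ===== LEMMAS AND PROOFS =====

-- the cost-list part of givel_alt, named for the proofs (definitionally equal)
def pvCosts (l : Int) (n : Int) : List Int :=
  let p := (PySem.List.pyRange 0 (l - 1) 1).foldl
    (fun (q : List Int × Int) (i : Int) =>
      let t := max 0 (min q.2 (l - 1 - i))
      (q.1 ++ [1 + t], q.2 - t))
    ([], n - (l - 1))
  if 0 < l then p.1 ++ [p.2] else p.1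

-- [l, l-1, ..., l-k+1]
def pvDesc (a : Int) : Nat → List Int
  | 0 => []
  | k+1 => a :: pvDesc (a - 1) k

-- total decrement capacity of positions 0..i-1 (position p can go from l-p down to 1)
def pvCapL (l : Int) : Nat → Int
  | 0 => 0
  | i+1 => pvCapL l i + (l - 1 - i)

-- capacity of the k positions j..j+k-1 (same sums, indexed from the left)
def pvCapSeg (l : Int) (j : Int) : Nat → Int
  | 0 => 0
  | k+1 => (l - 1 - j) + pvCapSeg l (j + 1) k

-- the recursive form of B's greedy cost loop from position j with remainder r
def pvGl (l : Int) (j : Int) (r : Int) : List Int × Int :=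
  if h : j < l - 1 then
    let t := max 0 (min r (l - 1 - j))
    let p := pvGl l (j + 1) (r - t)
    ((1 + t) :: p.1, p.2)
  else ([], r)
termination_by (l - 1 - j).toNat
decreasing_by omega

-- the list state of A's while loop in "phase 2": pointer at i, positions < i untouched,
-- position i holds v, positions right of i fully decremented
def pvState (l : Int) (i : Nat) (v : Int) : List Int :=
  pvDesc l i ++ v :: List.replicate (l.toNat - 2 - i) 1 ++ [0]

-- the final list the greedy loop produces from state (i, v) with remaining deficit r
def pvFinish (l : Int) (i : Nat) (v : Int) (r : Int) : List Int :=
  if r ≤ v - 1 then pvDesc l i ++ (v - r) :: List.replicate (l.toNat - 2 - i) 1 ++ [0]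
  else match i with
    | 0 => []            -- unreachable under pvValid
    | i'+1 => pvFinish l i' (l - i') (r - (v - 1))

def pvValid (l : Int) (i : Nat) (v : Int) (r : Int) : Prop :=
  0 ≤ r ∧ r ≤ (v - 1) + pvCapL l i ∧ 1 ≤ v ∧ v ≤ l - i ∧ (i : Int) ≤ l - 2

theorem pvApplyRev_step (Q L : List Int) (i : Int) (h : 0 ≤ i) :
    pvApplyRev Q L i = pvApplyRev Q (pvPal L i (PySem.List.pyGetD Q i 0)) (i - 1) := by
  rw [pvApplyRev.eq_def, dif_pos h]
  rfl

theorem pvApplyRev_stop (Q L : List Int) (i : Int) (h : ¬ 0 ≤ i) :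
    pvApplyRev Q L i = L := by
  rw [pvApplyRev.eq_def, dif_neg h]

theorem pvDesc_snoc (a : Int) (k : Nat) : pvDesc a (k + 1) = pvDesc a k ++ [a - k] := by
  induction k generalizing a with
  | zero => simp [pvDesc]
  | succ k ih =>
    show a :: pvDesc (a - 1) (k + 1) = (a :: pvDesc (a - 1) k) ++ [a - (k + 1)]
    rw [ih]
    simp
    ring_nf

theorem pvDesc_length (a : Int) (k : Nat) : (pvDesc a k).length = k := by
  induction k generalizing a with
  | zero => rfl
  | succ k ih => simp [pvDesc, ih]

theorem pvDesc_sum (a : Int) (k : Nat) : 2 * (pvDesc a k).sum = k * (2 * a - k + 1) := by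
  induction k generalizing a with
  | zero => simp [pvDesc]
  | succ k ih =>
    show 2 * (a + (pvDesc (a - 1) k).sum) = _
    rw [mul_add, ih]
    push_cast
    ring

theorem pvCapL_two_mul (l : Int) (i : Nat) : 2 * pvCapL l i = i * (2 * l - i - 1) := by
  induction i with
  | zero => simp [pvCapL]
  | succ i ih =>
    show 2 * (pvCapL l i + (l - 1 - i)) = _
    rw [mul_add, ih]
    push_cast
    ring

theorem pvCapSeg_two_mul (l : Int) (j : Int) (k : Nat) :
    2 * pvCapSeg l j k = k * (2 * (l - 1 - j) - k + 1) := by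
  induction k generalizing j with
  | zero => simp [pvCapSeg]
  | succ k ih =>
    show 2 * ((l - 1 - j) + pvCapSeg l (j + 1) k) = _
    rw [mul_add, ih]
    push_cast
    ring

theorem pvCapSeg_eq_capL (l : Int) (k : Nat) : pvCapSeg l 0 k = pvCapL l k := by
  have h1 := pvCapSeg_two_mul l 0 k
  have h2 := pvCapL_two_mul l k
  have : (k : Int) * (2 * (l - 1 - 0) - k + 1) = k * (2 * l - k - 1) := by ring
  omega

theorem pvCapSeg_nonneg (l : Int) (j : Int) (k : Nat) (h : j + k ≤ l - 1) :
    0 ≤ pvCapSeg l j k := by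
  induction k generalizing j with
  | zero => simp [pvCapSeg]
  | succ k ih =>
    have h1 : 0 ≤ pvCapSeg l (j + 1) k := ih (j + 1) (by push_cast at h ⊢; omega)
    show 0 ≤ (l - 1 - j) + pvCapSeg l (j + 1) k
    push_cast at h
    omega

theorem pvRange_reverse (l : Int) (hl : 0 ≤ l) :
    (PySem.List.pyRange 1 (l + 1) 1).reverse = pvDesc l l.toNat := by
  have h : ∀ (k : Nat), (PySem.List.pyRange 1 ((k : Int) + 1) 1).reverse = pvDesc k k := by
    intro k
    induction k with
    | zero => simp [PySem.List.pyRange_one_eq_nil, pvDesc]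
    | succ k ih =>
      rw [show ((k + 1 : Nat) : Int) + 1 = ((k : Int) + 1) + 1 by push_cast; ring,
        PySem.List.pyRange_one_succ_right (by omega)]
      rw [List.reverse_append, ih]
      show ((k : Int) + 1) :: pvDesc (k : Int) k = ((k + 1 : Nat) : Int) :: pvDesc (((k + 1 : Nat) : Int) - 1) k
      push_cast
      norm_num
  have := h l.toNat
  rw [show ((l.toNat : Int)) = l by omega] at this
  rw [this]

-- ===== the greedy cost loop of B =====

theorem pvGl_unfold (l j r : Int) (h : j < l - 1) :
    pvGl l j r = ((1 + max 0 (min r (l - 1 - j))) :: (pvGl l (j + 1) (r - max 0 (min r (l - 1 - j)))).1,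
      (pvGl l (j + 1) (r - max 0 (min r (l - 1 - j)))).2) := by
  rw [pvGl.eq_def, dif_pos h]

theorem pvGl_stop (l j r : Int) (h : ¬ j < l - 1) : pvGl l j r = ([], r) := by
  rw [pvGl.eq_def, dif_neg h]

-- the python for-loop (foldl with an appending accumulator) equals the recursion pvGl
theorem pvFoldG (l : Int) : ∀ (k : Nat) (j r : Int) (acc : List Int), (l - 1 - j).toNat = k →
    (PySem.List.pyRange j (l - 1) 1).foldl
      (fun (q : List Int × Int) (i : Int) =>
        let t := max 0 (min q.2 (l - 1 - i))
        (q.1 ++ [1 + t], q.2 - t))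
      (acc, r)
      = (acc ++ (pvGl l j r).1, (pvGl l j r).2) := by
  intro k
  induction k with
  | zero =>
    intro j r acc hk
    rw [PySem.List.pyRange_one_eq_nil (by omega), List.foldl_nil,
      pvGl_stop l j r (by omega)]
    simp
  | succ k ih =>
    intro j r acc hk
    rw [PySem.List.pyRange_one_cons (by omega), List.foldl_cons]
    show (PySem.List.pyRange (j + 1) (l - 1) 1).foldl _
        (acc ++ [1 + max 0 (min r (l - 1 - j))], r - max 0 (min r (l - 1 - j))) = _
    rw [ih (j + 1) (r - max 0 (min r (l - 1 - j))) _ (by omega),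
      pvGl_unfold l j r (by omega)]
    simp

theorem pvGl_neg (l : Int) : ∀ (k : Nat) (j r : Int), (l - 1 - j).toNat = k → r ≤ 0 →
    pvGl l j r = (List.replicate k 1, r) := by
  intro k
  induction k with
  | zero =>
    intro j r hk hr
    rw [pvGl_stop l j r (by omega)]
    rfl
  | succ k ih =>
    intro j r hk hr
    have ht : max 0 (min r (l - 1 - j)) = 0 := by
      rw [min_eq_left (by omega), max_eq_left hr]
    rw [pvGl_unfold l j r (by omega), ht, sub_zero, ih (j + 1) r (by omega) hr]
    simp [List.replicate_succ]

theorem pvGl_small (l : Int) (j r : Int) (hj : j < l - 1) (h0 : 0 ≤ r) (hr : r ≤ l - 1 - j) :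
    pvGl l j r = ((1 + r) :: List.replicate ((l - 1 - j).toNat - 1) 1, 0) := by
  have ht : max 0 (min r (l - 1 - j)) = r := by
    rw [min_eq_left hr, max_eq_right h0]
  rw [pvGl_unfold l j r hj, ht, sub_self,
    pvGl_neg l (l - 1 - (j + 1)).toNat (j + 1) 0 rfl le_rfl,
    show (l - 1 - (j + 1)).toNat = (l - 1 - j).toNat - 1 by omega]

-- with remainder at least the capacity of positions j..j+k-1 the greedy loop
-- fills them all, producing a descending prefix
theorem pvGl_fill (l : Int) : ∀ (k : Nat) (j r : Int), 0 ≤ j → j + k ≤ l - 1 →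
    pvCapSeg l j k ≤ r →
    pvGl l j r = (pvDesc (l - j) k ++ (pvGl l (j + k) (r - pvCapSeg l j k)).1,
      (pvGl l (j + k) (r - pvCapSeg l j k)).2) := by
  intro k
  induction k with
  | zero =>
    intro j r _ _ _
    show pvGl l j r = ([] ++ (pvGl l (j + 0) (r - 0)).1, (pvGl l (j + 0) (r - 0)).2)
    rw [add_zero, sub_zero]
    simp
  | succ k ih =>
    intro j r hj0 hjk hcap
    have hjl : j < l - 1 := by push_cast at hjk; omega
    have hseg : 0 ≤ pvCapSeg l (j + 1) k := pvCapSeg_nonneg l (j + 1) k (by push_cast at hjk ⊢; omega)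
    have hcs : pvCapSeg l j (k + 1) = (l - 1 - j) + pvCapSeg l (j + 1) k := rfl
    have ht : max 0 (min r (l - 1 - j)) = l - 1 - j := by
      rw [min_eq_right (by omega), max_eq_right (by omega)]
    rw [pvGl_unfold l j r hjl, ht,
      ih (j + 1) (r - (l - 1 - j)) (by omega) (by push_cast at hjk ⊢; omega) (by omega)]
    rw [show pvDesc (l - j) (k + 1) = (l - j) :: pvDesc (l - j - 1) k from rfl]
    rw [show (1 : Int) + (l - 1 - j) = l - j by ring,
      show l - (j + 1) = l - j - 1 by ring,
      show j + 1 + (k : Int) = j + ((k + 1 : Nat) : Int) by push_cast; ring,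
      show r - (l - 1 - j) - pvCapSeg l (j + 1) k = r - pvCapSeg l j (k + 1) by rw [hcs]; ring]
    simp

theorem pvFinish_dec (l : Int) (i : Nat) (v r : Int) :
    pvFinish l i (v - 1) (r - 1) = pvFinish l i v r := by
  by_cases h : r ≤ v - 1
  · rw [pvFinish.eq_def, pvFinish.eq_def, if_pos (by omega), if_pos h]
    rw [show v - 1 - (r - 1) = v - r by ring]
  · rw [pvFinish.eq_def, pvFinish.eq_def, if_neg (by omega), if_neg (by omega)]
    cases i with
    | zero => rfl
    | succ i' => rw [show r - 1 - (v - 1 - 1) = r - (v - 1) by ring]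

theorem pvValid_step (l : Int) (i : Nat) (v r : Int) (h : pvValid l (i + 1) v r) (hr : v ≤ r) :
    pvValid l i (l - i) (r - (v - 1)) := by
  unfold pvValid at *
  have hc : pvCapL l (i + 1) = pvCapL l i + (l - 1 - i) := rfl
  push_cast at *
  omega

-- on a valid state, the greedy arithmetic pass produces exactly A's final cost list
theorem pvGl_main (l : Int) : ∀ (i : Nat) (v r : Int), pvValid l i v r →
    (pvGl l 0 (pvCapL l i + (v - 1) - r)).1 ++ [(pvGl l 0 (pvCapL l i + (v - 1) - r)).2]
      = pvFinish l i v r := by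
  intro i
  induction i with
  | zero =>
    intro v r h
    obtain ⟨h1, h2, h3, h4, h5⟩ := h
    have hc0 : pvCapL l 0 = 0 := rfl
    rw [pvGl_small l 0 (pvCapL l 0 + (v - 1) - r) (by omega) (by omega) (by omega)]
    rw [pvFinish.eq_def, if_pos (by rw [hc0] at h2; omega)]
    show (1 + (pvCapL l 0 + (v - 1) - r)) :: List.replicate ((l - 1 - 0).toNat - 1) 1 ++ [0]
        = pvDesc l 0 ++ (v - r) :: List.replicate (l.toNat - 2 - 0) 1 ++ [0]
    rw [show (1 : Int) + (pvCapL l 0 + (v - 1) - r) = v - r by rw [hc0]; ring,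
      show (l - 1 - 0).toNat - 1 = l.toNat - 2 - 0 by omega]
    rfl
  | succ i' ih =>
    intro v r h
    obtain ⟨h1, h2, h3, h4, h5⟩ := h
    by_cases hb : r ≤ v - 1
    · have hcap0 : 0 ≤ pvCapL l (i' + 1) := by
        have := pvCapSeg_nonneg l 0 (i' + 1) (by push_cast at h5 ⊢; omega)
        rw [pvCapSeg_eq_capL] at this
        exact this
      rw [show pvCapL l (i' + 1) + (v - 1) - r
          = pvCapSeg l 0 (i' + 1) + ((v - 1 - r) + (pvCapL l (i' + 1) - pvCapSeg l 0 (i' + 1)))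
          by ring]
      rw [pvCapSeg_eq_capL, show pvCapL l (i' + 1) - pvCapL l (i' + 1) = 0 by ring, add_zero]
      rw [show pvCapL l (i' + 1) + (v - 1 - r) = pvCapSeg l 0 (i' + 1) + (v - 1 - r)
          by rw [pvCapSeg_eq_capL]]
      rw [pvGl_fill l (i' + 1) 0 (pvCapSeg l 0 (i' + 1) + (v - 1 - r)) le_rfl
        (by push_cast at h5 ⊢; omega) (by omega)]
      rw [show pvCapSeg l 0 (i' + 1) + (v - 1 - r) - pvCapSeg l 0 (i' + 1) = v - 1 - r by ring]
      rw [show (0 : Int) + ((i' + 1 : Nat) : Int) = ((i' + 1 : Nat) : Int) by ring]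
      rw [pvGl_small l ((i' + 1 : Nat) : Int) (v - 1 - r) (by push_cast at h5 ⊢; omega)
        (by omega) (by push_cast at h4 ⊢; omega)]
      rw [pvFinish.eq_def, if_pos hb]
      show pvDesc (l - 0) (i' + 1) ++ ((1 + (v - 1 - r)) :: List.replicate ((l - 1 - ((i' + 1 : Nat) : Int)).toNat - 1) 1) ++ [0]
          = pvDesc l (i' + 1) ++ (v - r) :: List.replicate (l.toNat - 2 - (i' + 1)) 1 ++ [0]
    
      rw [show l - (0 : Int) = l by ring,
        show (1 : Int) + (v - 1 - r) = v - r by ring,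
        show (l - 1 - ((i' + 1 : Nat) : Int)).toNat - 1 = l.toNat - 2 - (i' + 1) by push_cast; omega]
    · rw [pvFinish.eq_def, if_neg hb]
      have hstep : pvCapL l (i' + 1) = pvCapL l i' + (l - 1 - i') := rfl
      rw [show pvCapL l (i' + 1) + (v - 1) - r
          = pvCapL l i' + ((l - i') - 1) - (r - (v - 1)) by rw [hstep]; ring]
      exact ih (l - i') (r - (v - 1)) (pvValid_step l i' v r ⟨h1, h2, h3, h4, h5⟩ (by omega))

-- ===== A's while loop: phase analysis (unchanged from the port's structure) =====

theorem pvExpl_get_at (l : Int) (i : Nat) (v : Int) :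
    (pvDesc l i ++ v :: List.replicate (l.toNat - 2 - i) 1 ++ [0])[i]? = some v := by
  rw [List.append_assoc, List.getElem?_append_right (by rw [pvDesc_length]), pvDesc_length]
  simp

theorem pvExpl_length (l : Int) (i : Nat) (v : Int) (hi : i ≤ l.toNat - 2) (hl : 2 ≤ l) :
    (pvDesc l i ++ v :: List.replicate (l.toNat - 2 - i) 1 ++ [0]).length = l.toNat := by
  simp [pvDesc_length]
  omega

theorem pvSet_mid (pre t : List Int) (i : Nat) (v w : Int) (h : pre.length = i) :
    (pre ++ v :: t).set i w = pre ++ w :: t := by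
  subst h; simp

theorem pvState_set (l : Int) (i : Nat) (v w : Int) :
    (pvState l i v).set i w = pvState l i w := by
  unfold pvState
  rw [List.append_assoc, List.append_assoc, List.cons_append, List.cons_append,
    pvSet_mid _ _ _ _ _ (pvDesc_length l i)]

theorem pvState_shift (l : Int) (i : Nat) (h : i + 1 ≤ l.toNat - 2) :
    pvState l (i + 1) 1 = pvState l i (l - i) := by
  unfold pvState
  rw [pvDesc_snoc, show l.toNat - 2 - i = (l.toNat - 2 - (i + 1)) + 1 by omega,
    List.replicate_succ]
  simp

theorem pvState_sum_pred (l : Int) (i : Nat) (v : Int) :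
    (pvState l i (v - 1)).sum = (pvState l i v).sum - 1 := by
  unfold pvState
  simp
  ring

theorem pvRetLoop_succ (n : Int) (fuel : Nat) (lst : List Int) (i : Int) :
    pvRetLoop n (fuel + 1) lst i =
      if lst.sum = n then lst
      else
        match PySem.List.pyGet? lst i with
        | none => lst
        | some v =>
          if (v = 1 ∧ i < (lst.length : Int) - 1) ∨ (v = 0 ∧ i = (lst.length : Int) - 1)
          then pvRetLoop n fuel lst (i - 1)
          else pvRetLoop n fuel (PySem.List.pySetD lst i (v - 1)) i := rfl

-- A's while loop from a phase-2 state computes the greedy result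
theorem pvRetLoop_phase2 (l n : Int) (fuel : Nat) :
    ∀ (i : Nat) (v r : Int), pvValid l i v r →
    (pvState l i v).sum = n + r → r.toNat + i + 1 ≤ fuel →
    pvRetLoop n fuel (pvState l i v) i = pvFinish l i v r := by
  induction fuel with
  | zero => intro i v r _ _ hfuel; omega
  | succ fuel ih =>
    intro i v r hval hsum hfuel
    obtain ⟨hr0, hrcap, hv1, hvle, hil⟩ := hval
    have hl2 : 2 ≤ l := by omega
    have hiN : i ≤ l.toNat - 2 := by omega
    have hlen : ((pvState l i v).length : Int) = l := by
      rw [show (pvState l i v).length = l.toNat from pvExpl_length l i v hiN hl2]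
      omega
    by_cases hr : r = 0
    · subst hr
      rw [pvRetLoop, if_pos (by rw [hsum]; ring)]
      rw [pvFinish.eq_def, if_pos (by omega)]
      unfold pvState
      rw [sub_zero]
    · have hsne : ¬ (pvState l i v).sum = n := by rw [hsum]; omega
      rw [pvRetLoop, if_neg hsne]
      have hget : PySem.List.pyGet? (pvState l i v) (i : Int) = some v := by
        rw [PySem.List.pyGet?_natCast]
        exact pvExpl_get_at l i v
      simp only [hget]
      by_cases hv : v = 1
      · subst hv
        rw [if_pos (Or.inl ⟨rfl, by rw [hlen]; omega⟩)]
        have hi1 : 1 ≤ i := by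
          rcases Nat.eq_zero_or_pos i with h0 | h1
          · subst h0; simp [pvCapL] at hrcap; omega
          · exact h1
        obtain ⟨i', rfl⟩ : ∃ i', i = i' + 1 := ⟨i - 1, by omega⟩
        rw [show ((i' + 1 : Nat) : Int) - 1 = (i' : Int) by push_cast; ring]
        have hshift := pvState_shift l i' (by omega)
        have hcap' : pvCapL l (i' + 1) = pvCapL l i' + (l - 1 - i') := rfl
        rw [hshift]
        rw [ih i' (l - i') r
          ⟨hr0, by push_cast at hrcap ⊢; omega, by push_cast at hil ⊢; omega,
            by omega, by push_cast at hil ⊢; omega⟩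
          (by rw [← hshift, hsum]) (by omega)]
        conv_rhs => rw [pvFinish.eq_def]
        rw [if_neg (by omega)]
        norm_num
      · have hv2 : 2 ≤ v := by omega
        rw [if_neg (by
          rintro (⟨h1, _⟩ | ⟨h0, _⟩)
          · exact hv h1
          · omega)]
        have hset : PySem.List.pySetD (pvState l i v) (i : Int) (v - 1) = pvState l i (v - 1) := by
          rw [PySem.List.pySetD_natCast]
          exact pvState_set l i v (v - 1)
        rw [hset]
        have hcap' : pvCapL l (i + 1) = pvCapL l i + (l - 1 - i) := rfl
        rw [ih i (v - 1) (r - 1)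
          ⟨by omega, by omega, by omega, by omega, hil⟩
          (by rw [pvState_sum_pred, hsum]; ring) (by omega)]
        exact pvFinish_dec l i v r

-- A's second loop is B's while loop run on A's cost list
theorem pvFoldA (l : Int) (Q : List Int) :
    ∀ (a : Int) (L : List Int), 0 ≤ a → a ≤ l →
    (PySem.List.pyRange a l 1).foldl
      (fun L x => pvPal L (l - 1 - x) (PySem.List.pyGetD Q (l - 1 - x) 0)) L
      = pvApplyRev Q L (l - 1 - a) := by
  suffices key : ∀ (k : Nat) (a : Int) (L : List Int), (l - a).toNat = k → 0 ≤ a → a ≤ l →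
      (PySem.List.pyRange a l 1).foldl
        (fun L x => pvPal L (l - 1 - x) (PySem.List.pyGetD Q (l - 1 - x) 0)) L
        = pvApplyRev Q L (l - 1 - a) by
    intro a L h0 hal
    exact key (l - a).toNat a L rfl h0 hal
  intro k
  induction k with
  | zero =>
    intro a L hk h0 hal
    rw [PySem.List.pyRange_one_eq_nil (by omega), List.foldl_nil,
      pvApplyRev_stop _ _ _ (by omega)]
  | succ k ih =>
    intro a L hk h0 hal
    rw [PySem.List.pyRange_one_cons (by omega), List.foldl_cons,
      ih (a + 1) _ (by omega) (by omega) (by omega),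
      show l - 1 - (a + 1) = l - 1 - a - 1 by ring]
    rw [pvApplyRev_step Q L (l - 1 - a) (by omega)]

theorem pvCapL_nonneg (l : Int) (i : Nat) (h : (i : Int) ≤ l - 1) : 0 ≤ pvCapL l i := by
  induction i with
  | zero => simp [pvCapL]
  | succ i' ih =>
    have h1 : 0 ≤ pvCapL l i' := ih (by push_cast at h ⊢; omega)
    have h2 : pvCapL l (i' + 1) = pvCapL l i' + (l - 1 - i') := rfl
    push_cast at h
    omega

theorem pvSetD_neg_one (ys : List Int) (a w : Int) :
    PySem.List.pySetD (ys ++ [a]) (-1) w = ys ++ [w] := by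
  simp [PySem.List.pySetD, PySem.List.pySet?, PySem.List.pyIdx?]

-- "phase 3" of A's loop on degenerate targets: the pointer has wrapped to -1 and the
-- last element is decremented below zero until the sum reaches n
theorem pvRetLoop_last (l n : Int) (hl : 1 ≤ l) :
    ∀ (fuel : Nat) (x r : Int), x ≤ 0 → 0 ≤ r →
    (List.replicate (l.toNat - 1) (1 : Int) ++ [x]).sum = n + r → r.toNat + 1 ≤ fuel →
    pvRetLoop n fuel (List.replicate (l.toNat - 1) (1 : Int) ++ [x]) (-1)
      = List.replicate (l.toNat - 1) (1 : Int) ++ [x - r] := by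
  intro fuel
  induction fuel with
  | zero => intro x r _ _ _ hfuel; omega
  | succ fuel ih =>
    intro x r hx hr hsum hfuel
    have hlenL : (((List.replicate (l.toNat - 1) (1 : Int) ++ [x]).length) : Int) = l := by
      simp; omega
    by_cases hr0 : r = 0
    · subst hr0
      rw [pvRetLoop_succ, if_pos (by omega), sub_zero]
    · rw [pvRetLoop_succ, if_neg (by omega)]
      simp only [PySem.List.pyGet?_neg_one_append_singleton]
      rw [if_neg (by
        rintro (⟨hx1, _⟩ | ⟨_, hc⟩)
        · omega
        · rw [hlenL] at hc; omega)]
      rw [pvSetD_neg_one]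
      have hsum' : (List.replicate (l.toNat - 1) (1 : Int) ++ [x - 1]).sum = n + (r - 1) := by
        have e1 : (List.replicate (l.toNat - 1) (1 : Int) ++ [x - 1]).sum
            = (List.replicate (l.toNat - 1) (1 : Int) ++ [x]).sum - 1 := by simp; ring
        omega
      rw [ih (x - 1) (r - 1) (by omega) (by omega) hsum' (by omega),
        show x - 1 - (r - 1) = x - r by ring]

-- phase 2 with a deficit exceeding the remaining capacity: the loop drains every
-- position to its minimum and falls through to "phase 3"
theorem pvRetLoop_over (l n : Int) :
    ∀ (fuel : Nat) (i : Nat) (v r : Int),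
    1 ≤ v → v ≤ l - i → (i : Int) ≤ l - 2 → v + pvCapL l i ≤ r →
    (pvState l i v).sum = n + r → r.toNat + i + 2 ≤ fuel →
    pvRetLoop n fuel (pvState l i v) i
      = List.replicate (l.toNat - 1) (1 : Int) ++ [n - (l - 1)] := by
  intro fuel
  induction fuel with
  | zero => intro i v r _ _ _ _ _ hfuel; omega
  | succ fuel ih =>
    intro i v r hv1 hvle hil hcap hsum hfuel
    have hl2 : 2 ≤ l := by omega
    have hiN : i ≤ l.toNat - 2 := by omega
    have hcap0 : 0 ≤ pvCapL l i := pvCapL_nonneg l i (by omega)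
    have hr1 : 1 ≤ r := by omega
    have hlen : ((pvState l i v).length : Int) = l := by
      rw [show (pvState l i v).length = l.toNat from pvExpl_length l i v hiN hl2]
      omega
    rw [pvRetLoop_succ, if_neg (by omega)]
    have hget : PySem.List.pyGet? (pvState l i v) (i : Int) = some v := by
      rw [PySem.List.pyGet?_natCast]
      exact pvExpl_get_at l i v
    simp only [hget]
    by_cases hv : v = 1
    · subst hv
      rw [if_pos (Or.inl ⟨rfl, by rw [hlen]; omega⟩)]
      cases i with
      | zero =>
        have hstate : pvState l 0 1 = List.replicate (l.toNat - 1) (1 : Int) ++ [0] := by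
          unfold pvState
          rw [show l.toNat - 1 = (l.toNat - 2) + 1 by omega, List.replicate_succ]
          simp [pvDesc]
        rw [show ((0 : Nat) : Int) - 1 = -1 by norm_num, hstate]
        have hs0 : (List.replicate (l.toNat - 1) (1 : Int) ++ [(0 : Int)]).sum = l - 1 := by
          simp; omega
        rw [pvRetLoop_last l n (by omega) fuel 0 r le_rfl (by omega)
          (by rw [← hstate, hsum]) (by omega)]
        rw [hstate] at hsum
        rw [show (0 : Int) - r = n - (l - 1) by omega]
      | succ i' =>
        have hi1 : (1 : Int) ≤ l - 2 - i' := by push_cast at hil; omega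
        rw [show ((i' + 1 : Nat) : Int) - 1 = (i' : Int) by push_cast; ring]
        have hshift := pvState_shift l i' (by omega)
        have hcap' : pvCapL l (i' + 1) = pvCapL l i' + (l - 1 - i') := rfl
        rw [hshift]
        exact ih i' (l - i') r (by omega) (by omega)
          (by push_cast at hil ⊢; omega) (by omega)
          (by rw [← hshift, hsum]) (by omega)
    · have hv2 : 2 ≤ v := by omega
      rw [if_neg (by
        rintro (⟨h1, _⟩ | ⟨h0, _⟩)
        · exact hv h1
        · omega)]
      have hset : PySem.List.pySetD (pvState l i v) (i : Int) (v - 1) = pvState l i (v - 1) := by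
        rw [PySem.List.pySetD_natCast]
        exact pvState_set l i v (v - 1)
      rw [hset]
      exact ih i (v - 1) (r - 1) (by omega) (by omega) hil (by omega)
        (by rw [pvState_sum_pred, hsum]; ring) (by omega)

-- ===== VERDICT (by name: the statement is the Claim_ definition above) =====
theorem givel_spec : Claim_equal_givel := by
  unfold Claim_equal_givel Spec_givel
  intro l n _ hpre
  obtain ⟨hn2, hl0n⟩ := hpre
  have hA : givel l n = pvApplyRev (pvRet l n) (PySem.List.pyRange 1 (l + 1) 1) (l - 1) := by
    by_cases hl : 0 ≤ l
    · show (PySem.List.pyRange 0 l 1).foldl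
        (fun L x => pvPal L (l - 1 - x) (PySem.List.pyGetD (pvRet l n) (l - 1 - x) 0))
        (PySem.List.pyRange 1 (l + 1) 1) = _
      rw [pvFoldA l (pvRet l n) 0 _ le_rfl hl, sub_zero]
    · show (PySem.List.pyRange 0 l 1).foldl _ _ = _
      rw [show PySem.List.pyRange 0 l 1 = [] from PySem.List.pyRange_one_eq_nil (by omega),
        List.foldl_nil, pvApplyRev_stop _ _ _ (by omega)]
  have hB : givel_alt l n = pvApplyRev (pvCosts l n) (PySem.List.pyRange 1 (l + 1) 1) (l - 1) := rfl
  suffices hQC : pvCosts l n = pvRet l n by rw [hA, hB, hQC]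
  by_cases hl1 : l ≤ 0
  · obtain rfl : n = 0 := hl0n hl1
    have hC : pvCosts l 0 = [] := by
      show (if 0 < l then _ ++ _ else ((PySem.List.pyRange 0 (l - 1) 1).foldl _ (([] : List Int), (0 : Int) - (l - 1))).1) = []
      rw [if_neg (by omega), PySem.List.pyRange_one_eq_nil (by omega), List.foldl_nil]
    have hR : pvRet l 0 = [] := by
      show pvRetLoop 0 ((l * (l + 1)).toNat + ((0 : Int)).toNat + l.toNat + 2) -- (-0).toNat = 0
          ((PySem.List.pyRange 1 (l + 1) 1).reverse)
          ((((PySem.List.pyRange 1 (l + 1) 1).reverse).length : Int) - 1) = []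
      rw [PySem.List.pyRange_one_eq_nil (by omega : l + 1 ≤ 1)]
      rfl
    rw [hC, hR]
  have hl : 1 ≤ l := by omega
  have hS : 2 * PySem.Int.floordiv (l * (l + 1)) 2 = l * (l + 1) := by
    rw [PySem.Int.floordiv_eq_ediv_of_pos (by norm_num)]
    exact Int.two_mul_ediv_two_of_even (Int.even_mul_succ_self l)
  have hP : 0 ≤ l * (l + 1) := by nlinarith
  have hrange : (PySem.List.pyRange 1 (l + 1) 1).reverse = pvDesc l l.toNat :=
    pvRange_reverse l (by omega)
  have hsum0 : (pvDesc l l.toNat).sum = PySem.Int.floordiv (l * (l + 1)) 2 := by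
    have e1 := pvDesc_sum l l.toNat
    rw [show ((l.toNat : Int)) = l by omega] at e1
    have e2 : l * (2 * l - (l : Int) + 1) = l * (l + 1) := by ring
    linarith
  obtain ⟨F1, hF1⟩ : ∃ F1, (l * (l + 1)).toNat + (-n).toNat + l.toNat + 2 = F1 + 1 :=
    ⟨(l * (l + 1)).toNat + (-n).toNat + l.toNat + 1, by omega⟩
  obtain ⟨F2, hF2⟩ : ∃ F2, F1 = F2 + 1 := ⟨(l * (l + 1)).toNat + (-n).toNat + l.toNat, by omega⟩
  have hQpre : pvRet l n = pvRetLoop n (F1 + 1) (pvDesc l l.toNat) (l - 1) := by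
    show pvRetLoop n ((l * (l + 1)).toNat + (-n).toNat + l.toNat + 2)
        ((PySem.List.pyRange 1 (l + 1) 1).reverse)
        ((((PySem.List.pyRange 1 (l + 1) 1).reverse).length : Int) - 1) = _
    rw [hrange, pvDesc_length, show ((l.toNat : Int)) - 1 = l - 1 by omega, hF1]
  -- B's cost list in terms of the greedy recursion
  have hC : pvCosts l n = (pvGl l 0 (n - (l - 1))).1 ++ [(pvGl l 0 (n - (l - 1))).2] := by
    show (if 0 < l
        then ((PySem.List.pyRange 0 (l - 1) 1).foldl _ (([] : List Int), n - (l - 1))).1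
            ++ [((PySem.List.pyRange 0 (l - 1) 1).foldl _ (([] : List Int), n - (l - 1))).2]
        else _) = _
    rw [if_pos (by omega),
      pvFoldG l (l - 1 - 0).toNat 0 (n - (l - 1)) [] rfl]
    simp
  have e3 : pvDesc l l.toNat = pvDesc l (l.toNat - 1) ++ [1] := by
    conv_lhs => rw [show l.toNat = (l.toNat - 1) + 1 by omega]
    rw [pvDesc_snoc, show l - ((l.toNat - 1 : Nat) : Int) = 1 by omega]
  have hlen1 : (((pvDesc l (l.toNat - 1) ++ [1]) : List Int).length : Int) = l := by
    rw [← e3, pvDesc_length]; omega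
  have e5 : (pvDesc l (l.toNat - 1) ++ [0]).sum = (pvDesc l l.toNat).sum - 1 := by
    rw [e3]; simp
  have hSlb : l ≤ PySem.Int.floordiv (l * (l + 1)) 2 := by
    nlinarith [hS, mul_nonneg (by omega : (0:Int) ≤ l - 1) (by omega : (0:Int) ≤ l)]
  by_cases hdeg : n < l - 1
  · -- targets below the minimal reachable sum: A drains everything and dumps the
    -- remainder on the last cost; B's greedy pass hands out no excess and leaves
    -- the same remainder on the last cost
    have hQ : pvRet l n = List.replicate (l.toNat - 1) (1 : Int) ++ [n - (l - 1)] := by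
      rw [hQpre, pvRetLoop_succ, if_neg (by rw [hsum0]; omega), e3]
      have hg1 : PySem.List.pyGet? (pvDesc l (l.toNat - 1) ++ [1]) (l - 1) = some 1 := by
        rw [show (l - 1 : Int) = ((pvDesc l (l.toNat - 1)).length : Int) by rw [pvDesc_length]; omega]
        exact PySem.List.pyGet?_append_length _ [] 1
      simp only [hg1]
      rw [if_neg (by
        rintro (⟨_, hlt⟩ | ⟨h10, _⟩)
        · rw [hlen1] at hlt; omega
        · exact absurd h10 (by norm_num))]
      have hset : PySem.List.pySetD (pvDesc l (l.toNat - 1) ++ [1]) (l - 1) (1 - 1)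
          = pvDesc l (l.toNat - 1) ++ [0] := by
        rw [PySem.List.pySetD_of_nonneg _ _ (by omega),
          show (l - 1).toNat = (pvDesc l (l.toNat - 1)).length by rw [pvDesc_length]; omega]
        exact pvSet_mid _ _ _ _ _ rfl
      rw [hset, hF2, pvRetLoop_succ, if_neg (by rw [e5, hsum0]; omega)]
      have hg2 : PySem.List.pyGet? (pvDesc l (l.toNat - 1) ++ [0]) (l - 1) = some 0 := by
        rw [show (l - 1 : Int) = ((pvDesc l (l.toNat - 1)).length : Int) by rw [pvDesc_length]; omega]
        exact PySem.List.pyGet?_append_length _ [] 0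
      simp only [hg2]
      have hlen2 : (((pvDesc l (l.toNat - 1) ++ [0]) : List Int).length : Int) = l := by
        simp [pvDesc_length]; omega
      by_cases hl2 : 2 ≤ l
      · -- pass through phase 2 (overflowing) into phase 3
        have e4 : pvDesc l (l.toNat - 1) ++ [0] = pvState l (l.toNat - 2) 2 := by
          unfold pvState
          rw [show l.toNat - 2 - (l.toNat - 2) = 0 by omega]
          conv_lhs => rw [show l.toNat - 1 = (l.toNat - 2) + 1 by omega]
          rw [pvDesc_snoc, show l - ((l.toNat - 2 : Nat) : Int) = 2 by omega]
          simp
        rw [if_pos (Or.inr (⟨trivial, by rw [hlen2]⟩ : True ∧ _)),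
          show l - 1 - 1 = ((l.toNat - 2 : Nat) : Int) by omega, e4]
        have hc := pvCapL_two_mul l (l.toNat - 2)
        rw [show ((l.toNat - 2 : Nat) : Int) = l - 2 by omega] at hc
        have hr2 : (l - 2) * (2 * l - (l - 2) - 1) = l * l - l - 2 := by ring
        have hll : l * (l + 1) = l * l + l := by ring
        exact pvRetLoop_over l n F2 (l.toNat - 2) 2
          (PySem.Int.floordiv (l * (l + 1)) 2 - n - 1) (by omega) (by omega) (by omega)
          (by omega) (by rw [← e4, e5, hsum0]; omega) (by omega)
      · -- l = 1: go straight to phase 3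
        have hl1' : l = 1 := by omega
        rw [if_pos (Or.inr (⟨trivial, by rw [hlen2]⟩ : True ∧ _))]
        have hrep : pvDesc l (l.toNat - 1) ++ [(0 : Int)]
            = List.replicate (l.toNat - 1) (1 : Int) ++ [0] := by
          rw [hl1']; rfl
        rw [hrep, show l - 1 - 1 = (-1 : Int) by rw [hl1']; norm_num]
        have hs0 : (List.replicate (l.toNat - 1) (1 : Int) ++ [(0 : Int)]).sum = l - 1 := by
          simp; omega
        rw [pvRetLoop_last l n hl F2 0 (l - 1 - n) (le_refl 0) (by omega)
          (by omega) (by omega), show (0 : Int) - (l - 1 - n) = n - (l - 1) by ring]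
    rw [hC, hQ, pvGl_neg l (l - 1 - 0).toNat 0 (n - (l - 1)) rfl (by omega),
      show (l - 1 - 0).toNat = l.toNat - 1 by omega]
  · -- reachable targets l-1 ≤ n ≤ l(l+1)/2
    by_cases hd : PySem.Int.floordiv (l * (l + 1)) 2 - n = 0
    · -- n is the maximal sum: A returns the untouched descending list; the greedy
      -- pass fills every position and leaves 1 on the last
      have hQ : pvRet l n = pvDesc l l.toNat := by
        rw [hQpre, pvRetLoop_succ, if_pos (by rw [hsum0]; omega)]
      have hm : n - (l - 1) = pvCapSeg l 0 (l.toNat - 1) + 1 := by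
        have h1 := pvCapSeg_two_mul l 0 (l.toNat - 1)
        have h2 : ((l.toNat - 1 : Nat) : Int) = l - 1 := by omega
        rw [h2] at h1
        have h3 : (l - 1) * (2 * (l - 1 - 0) - (l - 1) + 1) = l * l - l := by ring
        have h4 : l * (l + 1) = l * l + l := by ring
        omega
      rw [hC, hQ, hm,
        pvGl_fill l (l.toNat - 1) 0 (pvCapSeg l 0 (l.toNat - 1) + 1) le_rfl
          (by omega) (by omega)]
      rw [show pvCapSeg l 0 (l.toNat - 1) + 1 - pvCapSeg l 0 (l.toNat - 1) = 1 by ring,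
        show (0 : Int) + ((l.toNat - 1 : Nat) : Int) = l - 1 by omega]
      rw [pvGl_stop l (l - 1) 1 (by omega)]
      rw [show l - (0 : Int) = l by ring]
      simpa using e3.symm
    · -- the generic case: A's search ends in a phase-2 state; the greedy pass
      -- produces the same pvFinish list
      have hd1 : 1 ≤ PySem.Int.floordiv (l * (l + 1)) 2 - n := by
        have h2n : 2 * n ≤ 2 * PySem.Int.floordiv (l * (l + 1)) 2 := by rw [hS]; exact hn2
        omega
      have h2d : 2 * (PySem.Int.floordiv (l * (l + 1)) 2 - n) ≤ l * l - l + 2 := by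
        have h1 : 2 * PySem.Int.floordiv (l * (l + 1)) 2 = l * l + l := by rw [hS]; ring
        omega
      by_cases hl2 : 2 ≤ l
      case neg =>
        -- l = 1 forces n = 0 here
        have hl1' : l = 1 := by omega
        subst hl1'
        have hn0 : n = 0 := by
          have : PySem.Int.floordiv 2 2 = 1 := by decide
          simp only [show (1 : Int) * (1 + 1) = 2 by norm_num] at hd1 hd ⊢
          omega
        subst hn0
        have hR : pvRet 1 0 = [0] := by decide
        have hCv : pvCosts 1 0 = [0] := by
          rw [hC, pvGl_stop 1 0 (0 - (1 - 1)) (by norm_num)]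
          norm_num
        rw [hCv, hR]
      case pos =>
      set D := PySem.Int.floordiv (l * (l + 1)) 2 - n with hD
      have hvalid : pvValid l (l.toNat - 2) 2 (D - 1) := by
        refine ⟨by omega, ?_, by omega, by omega, by omega⟩
        have hc := pvCapL_two_mul l (l.toNat - 2)
        rw [show ((l.toNat - 2 : Nat) : Int) = l - 2 by omega] at hc
        have hr2 : (l - 2) * (2 * l - (l - 2) - 1) = l * l - l - 2 := by ring
        omega
      have e4 : pvDesc l (l.toNat - 1) ++ [0] = pvState l (l.toNat - 2) 2 := by
        unfold pvState
        rw [show l.toNat - 2 - (l.toNat - 2) = 0 by omega]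
        conv_lhs => rw [show l.toNat - 1 = (l.toNat - 2) + 1 by omega]
        rw [pvDesc_snoc, show l - ((l.toNat - 2 : Nat) : Int) = 2 by omega]
        simp
      have hlen2 : (((pvDesc l (l.toNat - 1) ++ [0]) : List Int).length : Int) = l := by
        simp [pvDesc_length]; omega
      have hQ : pvRet l n = pvFinish l (l.toNat - 2) 2 (D - 1) := by
        rw [hQpre, pvRetLoop_succ, if_neg (by rw [hsum0]; omega), e3]
        have hg1 : PySem.List.pyGet? (pvDesc l (l.toNat - 1) ++ [1]) (l - 1) = some 1 := by
          rw [show (l - 1 : Int) = ((pvDesc l (l.toNat - 1)).length : Int) by rw [pvDesc_length]; omega]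
          exact PySem.List.pyGet?_append_length _ [] 1
        simp only [hg1]
        rw [if_neg (by
          rintro (⟨_, hlt⟩ | ⟨h10, _⟩)
          · rw [hlen1] at hlt; omega
          · exact absurd h10 (by norm_num))]
        have hset : PySem.List.pySetD (pvDesc l (l.toNat - 1) ++ [1]) (l - 1) (1 - 1)
            = pvDesc l (l.toNat - 1) ++ [0] := by
          rw [PySem.List.pySetD_of_nonneg _ _ (by omega),
            show (l - 1).toNat = (pvDesc l (l.toNat - 1)).length by rw [pvDesc_length]; omega]
          exact pvSet_mid _ _ _ _ _ rfl
        rw [hset, hF2, pvRetLoop_succ]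
        by_cases hd2 : D = 1
        · rw [if_pos (by rw [e5, hsum0]; omega), e4, pvFinish.eq_def, if_pos (by omega)]
          unfold pvState
          rw [hd2]
          norm_num
        · rw [if_neg (by rw [e5, hsum0]; omega)]
          have hg2 : PySem.List.pyGet? (pvDesc l (l.toNat - 1) ++ [0]) (l - 1) = some 0 := by
            rw [show (l - 1 : Int) = ((pvDesc l (l.toNat - 1)).length : Int) by rw [pvDesc_length]; omega]
            exact PySem.List.pyGet?_append_length _ [] 0
          simp only [hg2]
          rw [if_pos (Or.inr (⟨trivial, by rw [hlen2]⟩ : True ∧ _)),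
            show l - 1 - 1 = ((l.toNat - 2 : Nat) : Int) by omega, e4]
          exact pvRetLoop_phase2 l n F2 (l.toNat - 2) 2 (D - 1) hvalid
            (by rw [← e4, e5, hsum0]; omega) (by omega)
      have hm : n - (l - 1) = pvCapL l (l.toNat - 2) + (2 - 1) - (D - 1) := by
        have hc := pvCapL_two_mul l (l.toNat - 2)
        rw [show ((l.toNat - 2 : Nat) : Int) = l - 2 by omega] at hc
        have hr2 : (l - 2) * (2 * l - (l - 2) - 1) = l * l - l - 2 := by ring
        have hll : l * (l + 1) = l * l + l := by ring
        omega
      rw [hC, hQ, hm]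
      exact pvGl_main l (l.toNat - 2) 2 (D - 1) hvalid
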